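-- pv_equiv track=rewrite | github.com/ishigero/anagram | anagram.py | _search
-- ===== SOURCE A (Python) =====
-- def _search(a_l, w_l):
--     ret = []
--     while a_l:
--         if a_l[0] in w_l:
--             ret.append(a_l[0])
--             w_l.remove(a_l[0])
--         del a_l[0]
--     return ret
-- ===== SOURCE B (Python) =====
-- def _search(a_l, w_l):
--     # Counter-based one pass: O(n+m) vs A's quadratic remove/del scans.
--     # Return-value equivalence only: A mutates a_l and w_l in place, B does not.
--     need = {}
--     for w in w_l:
--         need[w] = need.get(w, 0) + 1
--     out = []
--     for a in a_l:
--         if need.get(a, 0) > 0: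
--             out.append(a)
--             need[a] = need[a] - 1
--     return out
-- ===== Notes on version B (the rewrite author's own statement) =====
-- stated objective: faster
-- what changed: Replaces the destructive scan (membership test in w_l plus list.remove and del a_l[0] each step, each a linear scan) with a dict multiset counter built once over w_l and a single pass over a_l that appends and decrements; B does not mutate its arguments, equivalence is on the return value.
import Mathlib
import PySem

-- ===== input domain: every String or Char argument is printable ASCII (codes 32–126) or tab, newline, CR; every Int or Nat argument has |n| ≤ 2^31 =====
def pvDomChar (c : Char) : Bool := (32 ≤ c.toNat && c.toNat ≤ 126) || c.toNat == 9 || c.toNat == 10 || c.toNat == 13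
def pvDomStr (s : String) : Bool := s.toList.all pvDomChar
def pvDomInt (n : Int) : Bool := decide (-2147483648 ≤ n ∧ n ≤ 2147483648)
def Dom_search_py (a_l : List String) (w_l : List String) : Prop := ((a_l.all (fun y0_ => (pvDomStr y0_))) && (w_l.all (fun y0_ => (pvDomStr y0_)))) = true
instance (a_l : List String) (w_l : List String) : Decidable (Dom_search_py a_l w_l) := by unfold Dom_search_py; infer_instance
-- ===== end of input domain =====

-- B replaces A's destructive membership-test/remove/del scans by a dict counter of w_l and
-- one pass over a_l (faster); A mutates a_l and w_l in place, B does not — the equivalence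
-- proved here is about the return value only.

-- ===== PORT A =====
-- A's while loop: consumes a_l from the front, removing matched words from w_l.
def searchGoA (a_l : List String) (w_l : List String) (ret : List String) : List String :=
  match a_l with
  | [] => ret
  | x :: rest =>
    if x ∈ w_l then
      searchGoA rest ((PySem.List.remove? w_l x).getD w_l) (ret ++ [x])
    else
      searchGoA rest w_l ret

def search_py (a_l : List String) (w_l : List String) : List String :=
  searchGoA a_l w_l []

-- ===== PORT B =====
-- B's step over a_l: append and decrement when the remaining count is positive.
def searchStepB (s : List String × PySem.Dict String Int) (a : String) :
    List String × PySem.Dict String Int :=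
  if s.2.getD a 0 > 0 then (s.1 ++ [a], s.2.insert a (s.2.getD a 0 - 1)) else s

def search_py_alt (a_l : List String) (w_l : List String) : List String :=
  let need := w_l.foldl (fun d w => d.insert w (d.getD w 0 + 1)) PySem.Dict.empty
  (a_l.foldl searchStepB ([], need)).1

-- ===== PRECONDITION & SPEC =====
def Spec_search_py (a_l : List String) (w_l : List String) (out : List String) : Prop := out = search_py_alt a_l w_l
instance (a_l : List String) (w_l : List String) (out : List String) : Decidable (Spec_search_py a_l w_l out) := by unfold Spec_search_py; infer_instance

-- ===== CLAIM (what is proved, stated in full; the proofs are below) =====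
def Claim_equal_search_py : Prop := ∀ (a_l : List String) (w_l : List String), Dom_search_py a_l w_l → Spec_search_py a_l w_l (search_py a_l w_l)

-- ===== LEMMAS AND PROOFS =====

-- Invariant: the dict is the multiset counter of the remaining word list.
theorem searchGo_eq_foldl (a_l : List String) (w_l : List String)
    (d : PySem.Dict String Int) (ret : List String)
    (h : ∀ x, d.getD x 0 = (w_l.count x : Int)) :
    searchGoA a_l w_l ret = (a_l.foldl searchStepB (ret, d)).1 := by
  induction a_l generalizing w_l d ret with
  | nil => simp [searchGoA]
  | cons x rest ih =>
    by_cases hx : x ∈ w_l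
    · have hc : 0 < w_l.count x := List.count_pos_iff.mpr hx
      have hd : d.getD x 0 > 0 := by rw [h x]; exact_mod_cast hc
      simp only [searchGoA, List.foldl_cons, searchStepB, hx, hd, if_true]
      rw [PySem.List.remove?_eq_some_erase w_l x hx]
      simp only [Option.getD_some]
      apply ih
      intro v
      rw [PySem.Dict.getD_insert, h x]
      by_cases hv : v = x
      · subst hv
        rw [if_pos rfl, List.count_erase_self]
        omega
      · rw [if_neg hv, List.count_erase_of_ne hv]
        exact h v
    · have hc : w_l.count x = 0 := List.count_eq_zero.mpr hx
      have hd : ¬ d.getD x 0 > 0 := by rw [h x, hc]; simp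
      simp only [searchGoA, List.foldl_cons, searchStepB, hx, if_neg hd]
      exact ih w_l d ret h

-- ===== VERDICT (by name: the statement is the Claim_ definition above) =====
theorem search_py_spec : Claim_equal_search_py := by
  intro a_l w_l _
  unfold Spec_search_py search_py search_py_alt
  rw [PySem.Dict.foldl_insert_getD_add_one_eq_counter]
  exact searchGo_eq_foldl a_l w_l _ [] (fun x => PySem.Dict.getD_counter w_l x)
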